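-- pv_equiv track=rewrite | github.com/oisee/odata_mcp | test_operation_filters.py | categorize_tools
-- ===== SOURCE A (Python) =====
-- def categorize_tools(tools):
--     """Categorize tools by operation type."""
--     categories = {
--         'C': [],  # Create
--         'S': [],  # Search
--         'F': [],  # Filter
--         'G': [],  # Get
--         'U': [],  # Update
--         'D': [],  # Delete
--         'A': []   # Actions/Functions
--     }
--
--     for tool in tools:
--         if tool.startswith('create_'):
--             categories['C'].append(tool)
--         elif tool.startswith('search_'):
--             categories['S'].append(tool)
--         elif tool.startswith('filter_') or tool.startswith('count_'):
--             categories['F'].append(tool)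
--         elif tool.startswith('get_'):
--             categories['G'].append(tool)
--         elif tool.startswith('update_') or tool.startswith('upd_'):
--             categories['U'].append(tool)
--         elif tool.startswith('delete_') or tool.startswith('del_'):
--             categories['D'].append(tool)
--         elif 'service_info' not in tool and 'readme' not in tool:
--             # Assume other tools are functions/actions
--             categories['A'].append(tool)
--
--     return categories
-- ===== SOURCE B (Python) =====
-- VERB = {'create': 'C', 'search': 'S', 'filter': 'F', 'count': 'F', 'get': 'G',
--         'update': 'U', 'upd': 'U', 'delete': 'D', 'del': 'D'}
--
--
-- def _category(tool):
--     """Label for one tool: the verb before its first underscore, else 'A'/None."""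
--     i = tool.find('_')
--     if i >= 0:
--         cat = VERB.get(tool[:i])
--         if cat is not None:
--             return cat
--     if 'service_info' in tool or 'readme' in tool:
--         return None
--     return 'A'
--
--
-- def categorize_tools(tools):
--     """Categorize tools by operation type: classify each tool by its leading verb, then group."""
--     return {k: [t for t in tools if _category(t) == k] for k in 'CSFGUDA'}
-- ===== Notes on version B (the rewrite author's own statement) =====
-- stated objective: alternative
-- what changed: Instead of A's single mutating pass through an if/elif prefix chain, B classifies each tool by the verb before its first underscore via a verb->category map and builds the result as seven independent filter passes (one per category), with no dict mutation.
import Mathlib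
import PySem

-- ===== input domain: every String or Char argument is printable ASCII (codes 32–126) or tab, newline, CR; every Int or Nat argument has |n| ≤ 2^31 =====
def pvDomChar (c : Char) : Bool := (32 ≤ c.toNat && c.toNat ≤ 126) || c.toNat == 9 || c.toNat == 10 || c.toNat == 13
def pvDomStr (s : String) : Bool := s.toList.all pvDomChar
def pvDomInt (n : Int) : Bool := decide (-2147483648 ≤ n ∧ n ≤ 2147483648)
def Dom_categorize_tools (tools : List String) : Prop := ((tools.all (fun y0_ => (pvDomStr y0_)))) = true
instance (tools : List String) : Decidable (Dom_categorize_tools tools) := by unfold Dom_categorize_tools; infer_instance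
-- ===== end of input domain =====

-- B replaces A's single mutating pass through an if/elif prefix chain by a per-tool classifier
-- (verb before the first underscore, looked up in a verb->category map) and seven independent
-- per-category filter passes (alternative: different construction, same cost).

-- ===== PORT A =====
-- for each tool: the if/elif chain, mutating the category's list in the dict
def ctStepA (d : PySem.Dict String (List String)) (tool : String) :
    PySem.Dict String (List String) :=
  if PySem.Str.startswith tool "create_" then d.modify "C" [] (· ++ [tool])
  else if PySem.Str.startswith tool "search_" then d.modify "S" [] (· ++ [tool])
  else if PySem.Str.startswith tool "filter_" || PySem.Str.startswith tool "count_" then d.modify "F" [] (· ++ [tool])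
  else if PySem.Str.startswith tool "get_" then d.modify "G" [] (· ++ [tool])
  else if PySem.Str.startswith tool "update_" || PySem.Str.startswith tool "upd_" then d.modify "U" [] (· ++ [tool])
  else if PySem.Str.startswith tool "delete_" || PySem.Str.startswith tool "del_" then d.modify "D" [] (· ++ [tool])
  else if !PySem.Str.isIn "service_info" tool && !PySem.Str.isIn "readme" tool then d.modify "A" [] (· ++ [tool])
  else d

def categorize_tools (tools : List String) : List (String × List String) :=
  (tools.foldl ctStepA
    (PySem.Dict.ofList [("C", []), ("S", []), ("F", []), ("G", []), ("U", []), ("D", []), ("A", [])])).items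

-- ===== PORT B =====
-- VERB: the verb before the first underscore -> category
def ctVerb : PySem.Dict String String :=
  PySem.Dict.ofList [("create", "C"), ("search", "S"), ("filter", "F"), ("count", "F"),
    ("get", "G"), ("update", "U"), ("upd", "U"), ("delete", "D"), ("del", "D")]

-- _category(tool): verb lookup, else the 'A' fallback, None for excluded tools
def ctCategory (tool : String) : Option String :=
  let i := PySem.Str.find tool "_"
  let cat : Option String :=
    if 0 ≤ i then ctVerb.get? (PySem.Str.slice tool none (some i)) else none
  match cat with
  | some c => some c
  | none =>
      if PySem.Str.isIn "service_info" tool || PySem.Str.isIn "readme" tool then none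
      else some "A"

-- {k: [t for t in tools if _category(t) == k] for k in 'CSFGUDA'}
def categorize_tools_alt (tools : List String) : List (String × List String) :=
  ["C", "S", "F", "G", "U", "D", "A"].map
    (fun k => (k, tools.filter (fun t => ctCategory t == some k)))

-- ===== PRECONDITION & SPEC =====
def Spec_categorize_tools (tools : List String) (out : List (String × List String)) : Prop := out = categorize_tools_alt tools
instance (tools : List String) (out : List (String × List String)) : Decidable (Spec_categorize_tools tools out) := by unfold Spec_categorize_tools; infer_instance

-- ===== CLAIM (what is proved, stated in full; the proofs are below) =====
def Claim_equal_categorize_tools : Prop := ∀ (tools : List String), Dom_categorize_tools tools → Spec_categorize_tools tools (categorize_tools tools)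

-- ===== LEMMAS AND PROOFS =====

-- ---- string facts: a verb-underscore prefix versus the first '_' found ----

-- if tool starts with v ++ "_" (v underscore-free), find lands at v.length and take gives v
theorem ct_take_find_of_startswith (s v : List Char) (hv : '_' ∉ v)
    (h : PySem.Chars.startswith s (v ++ ['_']) = true) :
    0 ≤ PySem.Chars.find s ['_'] ∧ s.take (PySem.Chars.find s ['_']).toNat = v := by
  rw [PySem.Chars.startswith_iff] at h
  obtain ⟨t, ht⟩ := h
  have hmem : '_' ∈ s := by rw [← ht]; simp
  have h0 : 0 ≤ PySem.Chars.find s ['_'] :=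
    (PySem.Chars.find_nonneg_iff s ['_']).2 ((List.singleton_infix_iff '_' s).2 hmem)
  obtain ⟨hpre, hmin⟩ := PySem.Chars.find_spec h0
  refine ⟨h0, ?_⟩
  set n := (PySem.Chars.find s ['_']).toNat with hn
  have hdropv : s.drop v.length = '_' :: t := by
    rw [← ht, List.append_assoc, List.drop_left, List.singleton_append]
  have hge : ¬ v.length < n := by
    intro hlt
    exact hmin v.length hlt (by rw [hdropv]; exact ⟨t, rfl⟩)
  have hgt : ¬ n < v.length := by
    intro hlt
    obtain ⟨u, hu⟩ := hpre
    have hsn : s[n]? = some '_' := by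
      have h1 : (s.drop n)[0]? = some '_' := by rw [← hu]; rfl
      rw [List.getElem?_drop] at h1
      simpa using h1
    have hvn : s[n]? = some v[n] := by
      rw [← ht, List.append_assoc, List.getElem?_append_left hlt]
      exact List.getElem?_eq_getElem hlt
    have hv' : v[n] = '_' := by
      rw [hvn] at hsn; exact Option.some.inj hsn
    exact hv (hv' ▸ v.getElem_mem hlt)
  have hlen : v.length = n := by omega
  rw [← hlen, ← ht, List.append_assoc, List.take_left]

-- conversely, if take-to-the-first-underscore is v, tool starts with v ++ "_"
theorem ct_startswith_of_take_find (s v : List Char)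
    (h0 : 0 ≤ PySem.Chars.find s ['_'])
    (hpre : s.take (PySem.Chars.find s ['_']).toNat = v) :
    PySem.Chars.startswith s (v ++ ['_']) = true := by
  obtain ⟨hp, -⟩ := PySem.Chars.find_spec h0
  obtain ⟨u, hu⟩ := hp
  rw [PySem.Chars.startswith_iff]
  refine ⟨u, ?_⟩
  rw [List.append_assoc]
  calc v ++ ('_' :: u)
      = s.take (PySem.Chars.find s ['_']).toNat ++ s.drop (PySem.Chars.find s ['_']).toNat := by
        rw [hpre, ← hu]; rfl
    _ = s := List.take_append_drop _ s

-- with no underscore in tool, no verb-underscore prefix matches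
theorem ct_startswith_false (s v : List Char) (h : ¬ 0 ≤ PySem.Chars.find s ['_']) :
    PySem.Chars.startswith s (v ++ ['_']) = false := by
  rw [Bool.eq_false_iff]
  intro hc
  rw [PySem.Chars.startswith_iff] at hc
  apply h
  rw [PySem.Chars.find_nonneg_iff, List.singleton_infix_iff]
  exact hc.sublist.mem (by simp)

-- the Str-level bridge used for each of the nine literal prefixes
theorem ct_sw (tool v vu key : String) (hvu : vu.toList = v.toList ++ ['_']) (hv : '_' ∉ v.toList)
    (h0 : 0 ≤ PySem.Str.find tool "_")
    (hkey : key.toList = tool.toList.take (PySem.Str.find tool "_").toNat) :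
    PySem.Str.startswith tool vu = (key == v) := by
  have h0' : 0 ≤ PySem.Chars.find tool.toList ['_'] := by
    rw [PySem.Str.find_eq] at h0; exact h0
  have hkey' : key.toList = tool.toList.take (PySem.Chars.find tool.toList ['_']).toNat := by
    rw [PySem.Str.find_eq] at hkey; exact hkey
  rw [PySem.Str.startswith_eq, hvu]
  by_cases hk : key = v
  · rw [ct_startswith_of_take_find _ _ h0' (by rw [← hkey', hk])]
    simp [hk]
  · have hf : PySem.Chars.startswith tool.toList (v.toList ++ ['_']) = false := by
      rw [Bool.eq_false_iff]
      intro hc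
      apply hk
      have := (ct_take_find_of_startswith tool.toList v.toList hv hc).2
      exact String.toList_inj.1 (hkey'.trans this)
    rw [hf]
    simp [hk]

-- ctVerb.get? key for a key different from all nine verbs
theorem ct_get?_none (key : String)
    (h1 : key ≠ "create") (h2 : key ≠ "search") (h3 : key ≠ "filter") (h4 : key ≠ "count")
    (h5 : key ≠ "get") (h6 : key ≠ "update") (h7 : key ≠ "upd") (h8 : key ≠ "delete")
    (h9 : key ≠ "del") : ctVerb.get? key = none := by
  have hv : ctVerb = PySem.Dict.mk [("create", "C"), ("search", "S"), ("filter", "F"),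
      ("count", "F"), ("get", "G"), ("update", "U"), ("upd", "U"), ("delete", "D"), ("del", "D")] := by
    decide
  rw [hv]
  simp [PySem.Dict.get?, Ne.symm h1, Ne.symm h2, Ne.symm h3,
    Ne.symm h4, Ne.symm h5, Ne.symm h6, Ne.symm h7, Ne.symm h8, Ne.symm h9]

-- ---- the loop body of A, expressed through B's classifier ----
theorem ctStepA_eq (d : PySem.Dict String (List String)) (tool : String) :
    ctStepA d tool = (match ctCategory tool with
      | some k => d.modify k [] (fun v => v ++ [tool])
      | none => d) := by
  unfold ctStepA
  simp only [ctCategory]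
  by_cases h0 : (0 : Int) ≤ PySem.Str.find tool "_"
  · set key := PySem.Str.slice tool none (some (PySem.Str.find tool "_")) with hkeydef
    have hkey : key.toList = tool.toList.take (PySem.Str.find tool "_").toNat := by
      rw [hkeydef, PySem.Str.toList_slice, PySem.Chars.slice_eq_listSlice,
        PySem.List.slice_to tool.toList h0]
    have hC := ct_sw tool "create" "create_" key (by decide) (by decide) h0 hkey
    have hS := ct_sw tool "search" "search_" key (by decide) (by decide) h0 hkey
    have hF1 := ct_sw tool "filter" "filter_" key (by decide) (by decide) h0 hkey
    have hF2 := ct_sw tool "count" "count_" key (by decide) (by decide) h0 hkey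
    have hG := ct_sw tool "get" "get_" key (by decide) (by decide) h0 hkey
    have hU1 := ct_sw tool "update" "update_" key (by decide) (by decide) h0 hkey
    have hU2 := ct_sw tool "upd" "upd_" key (by decide) (by decide) h0 hkey
    have hD1 := ct_sw tool "delete" "delete_" key (by decide) (by decide) h0 hkey
    have hD2 := ct_sw tool "del" "del_" key (by decide) (by decide) h0 hkey
    rw [hC, hS, hF1, hF2, hG, hU1, hU2, hD1, hD2, if_pos h0]
    by_cases e1 : key = "create"
    · simp [e1, (by decide : ctVerb.get? "create" = some "C")]
    · by_cases e2 : key = "search"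
      · simp [e2, (by decide : ctVerb.get? "search" = some "S")]
      · by_cases e3 : key = "filter"
        · simp [e3, (by decide : ctVerb.get? "filter" = some "F")]
        · by_cases e4 : key = "count"
          · simp [e4, (by decide : ctVerb.get? "count" = some "F")]
          · by_cases e5 : key = "get"
            · simp [e5, (by decide : ctVerb.get? "get" = some "G")]
            · by_cases e6 : key = "update"
              · simp [e6, (by decide : ctVerb.get? "update" = some "U")]
              · by_cases e7 : key = "upd"
                · simp [e7, (by decide : ctVerb.get? "upd" = some "U")]
                · by_cases e8 : key = "delete"
                  · simp [e8, (by decide : ctVerb.get? "delete" = some "D")]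
                  · by_cases e9 : key = "del"
                    · simp [e9, (by decide : ctVerb.get? "del" = some "D")]
                    · rw [ct_get?_none key e1 e2 e3 e4 e5 e6 e7 e8 e9]
                      simp only [beq_iff_eq, e1, e2, e5]
                      cases hi1 : PySem.Str.isIn "service_info" tool <;>
                        cases hi2 : PySem.Str.isIn "readme" tool <;>
                          simp [e3, e4, e6, e7, e8, e9]
  · have hfind : ¬ 0 ≤ PySem.Chars.find tool.toList ['_'] := by
      rw [← show ("_" : String).toList = ['_'] from rfl, ← PySem.Str.find_eq]; exact h0
    have hsw : ∀ v vu : String, vu.toList = v.toList ++ ['_'] →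
        PySem.Str.startswith tool vu = false := by
      intro v vu hvu
      rw [PySem.Str.startswith_eq, hvu]
      exact ct_startswith_false tool.toList v.toList hfind
    rw [hsw "create" "create_" (by decide), hsw "search" "search_" (by decide),
      hsw "filter" "filter_" (by decide), hsw "count" "count_" (by decide),
      hsw "get" "get_" (by decide), hsw "update" "update_" (by decide),
      hsw "upd" "upd_" (by decide), hsw "delete" "delete_" (by decide),
      hsw "del" "del_" (by decide), if_neg h0]
    cases hi1 : PySem.Str.isIn "service_info" tool <;>
      cases hi2 : PySem.Str.isIn "readme" tool <;> simp

-- ---- the classified (category, tool) pairs of B, driving A's loop ----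
def ctPairs (tools : List String) : List (String × String) :=
  tools.filterMap (fun t => (ctCategory t).map (fun k => (k, t)))

theorem foldl_stepA_eq (tools : List String) (d : PySem.Dict String (List String)) :
    tools.foldl ctStepA d =
      (ctPairs tools).foldl (fun d p => d.modify p.1 [] (fun x => x ++ [p.2])) d := by
  induction tools generalizing d with
  | nil => rfl
  | cons t ts ih =>
    simp only [List.foldl_cons, ctPairs, List.filterMap_cons]
    cases h : ctCategory t with
    | none => simp only [Option.map_none]; rw [ctStepA_eq, h]; exact ih d
    | some k =>
      simp only [Option.map_some, List.foldl_cons]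
      rw [ctStepA_eq, h]
      exact ih _

-- the classifier only produces the seven category keys
theorem ctCategory_mem (t k : String) (h : ctCategory t = some k) :
    k ∈ (["C", "S", "F", "G", "U", "D", "A"] : List String) := by
  simp only [ctCategory] at h
  by_cases h0 : (0 : Int) ≤ PySem.Str.find t "_"
  · rw [if_pos h0] at h
    cases hg : ctVerb.get? (PySem.Str.slice t none (some (PySem.Str.find t "_"))) with
    | some c =>
      rw [hg] at h
      have hc : c = k := by simpa using h
      have hm := PySem.Dict.mem_items_of_get?_eq_some ctVerb hg
      subst hc
      revert hm
      have hit : ctVerb.items = [("create", "C"), ("search", "S"), ("filter", "F"),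
          ("count", "F"), ("get", "G"), ("update", "U"), ("upd", "U"), ("delete", "D"),
          ("del", "D")] := by decide
      rw [hit]
      intro hm
      simp only [List.mem_cons, List.not_mem_nil, or_false, Prod.mk.injEq] at hm
      rcases hm with ⟨-, rfl⟩ | ⟨-, rfl⟩ | ⟨-, rfl⟩ | ⟨-, rfl⟩ | ⟨-, rfl⟩ | ⟨-, rfl⟩ |
        ⟨-, rfl⟩ | ⟨-, rfl⟩ | ⟨-, rfl⟩ <;> decide
    | none =>
      rw [hg] at h
      split_ifs at h with hi
      all_goals
        first
          | exact Option.noConfusion h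
          | (injection h with h'; subst h'; decide)
  · rw [if_neg h0] at h
    split_ifs at h with hi
    all_goals
      first
        | exact Option.noConfusion h
        | (injection h with h'; subst h'; decide)

-- the keys of A's dict after the loop are still exactly the seven seeded ones
theorem keys_final (tools : List String) :
    ((ctPairs tools).foldl (fun d p => d.modify p.1 [] (fun x => x ++ [p.2]))
      (PySem.Dict.ofList [("C", []), ("S", []), ("F", []), ("G", []), ("U", []), ("D", []),
        ("A", [])] : PySem.Dict String (List String))).keys =
    ["C", "S", "F", "G", "U", "D", "A"] := by
  rw [PySem.Dict.keys_foldl_modify_key (ctPairs tools) Prod.fst []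
    (fun _ p => fun x => x ++ [p.2])]
  rw [PySem.Set.update_eq_append_filter]
  have hks : (PySem.Dict.ofList [("C", ([] : List String)), ("S", []), ("F", []), ("G", []),
      ("U", []), ("D", []), ("A", [])]).keys = ["C", "S", "F", "G", "U", "D", "A"] := by decide
  rw [hks]
  have hfil : List.filter
      (fun y => !PySem.Set.contains (["C", "S", "F", "G", "U", "D", "A"] : List String) y)
      (PySem.Set.ofList ((ctPairs tools).map Prod.fst)) = [] := by
    apply List.filter_eq_nil_iff.2
    intro y hy
    rw [PySem.Set.mem_ofList] at hy
    obtain ⟨p, hp, rfl⟩ := List.mem_map.1 hy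
    obtain ⟨t, -, hft⟩ := List.mem_filterMap.1 hp
    have hcat : ctCategory t = some p.1 := by
      cases hc : ctCategory t with
      | none => rw [hc] at hft; simp at hft
      | some k =>
        rw [hc] at hft
        simp only [Option.map_some, Option.some.injEq] at hft
        subst hft
        rfl
    have hmem := ctCategory_mem t p.1 hcat
    have hcon : PySem.Set.contains (["C", "S", "F", "G", "U", "D", "A"] : List String) p.1 = true :=
      (PySem.Set.contains_iff _ _).2 hmem
    show ¬ (!PySem.Set.contains (["C", "S", "F", "G", "U", "D", "A"] : List String) p.1) = true
    rw [hcon]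
    decide
  rw [hfil, List.append_nil]

-- B's per-category filter pass equals the tools each classified pair contributes
theorem pairs_filter (tools : List String) (k : String) :
    ((ctPairs tools).filter (fun p => p.1 == k)).map (·.2) =
      tools.filter (fun t => ctCategory t == some k) := by
  induction tools with
  | nil => rfl
  | cons t ts ih =>
    simp only [ctPairs, List.filterMap_cons, List.filter_cons]
    cases h : ctCategory t with
    | none => simpa [h] using ih
    | some k' =>
      by_cases hk : k' = k
      · subst hk
        simp only [Option.map_some, List.filter_cons]
        simpa using ih
      · simpa [h, hk] using ih

-- ===== VERDICT (by name: the statement is the Claim_ definition above) =====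
theorem categorize_tools_spec : Claim_equal_categorize_tools := by
  intro tools _
  unfold Spec_categorize_tools categorize_tools categorize_tools_alt
  rw [foldl_stepA_eq]
  set D := (ctPairs tools).foldl (fun d p => d.modify p.1 [] (fun x => x ++ [p.2]))
    (PySem.Dict.ofList [("C", []), ("S", []), ("F", []), ("G", []), ("U", []), ("D", []),
      ("A", [])] : PySem.Dict String (List String)) with hD
  have hkeys : D.keys = ["C", "S", "F", "G", "U", "D", "A"] := keys_final tools
  have hgetD : ∀ c : String,
      (PySem.Dict.ofList [("C", ([] : List String)), ("S", []), ("F", []), ("G", []),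
        ("U", []), ("D", []), ("A", [])]).getD c [] = [] →
      D.getD c [] = tools.filter (fun t => ctCategory t == some c) := by
    intro c hc
    rw [hD, PySem.Dict.getD_foldl_modify_append, hc, List.nil_append, pairs_filter]
  rw [PySem.Dict.items_eq_map_keys D (by rw [hkeys]; decide) [], hkeys]
  simp only [List.map_cons, List.map_nil]
  rw [hgetD "C" (by decide), hgetD "S" (by decide), hgetD "F" (by decide),
    hgetD "G" (by decide), hgetD "U" (by decide), hgetD "D" (by decide),
    hgetD "A" (by decide)]
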